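-- pv_equiv track=rewrite | github.com/Evanston0624/Lasso-MLP | feature_info_BD_HC.py | get_repeat_idx
-- ===== SOURCE A (Python) =====
-- def get_repeat_idx( seq):
--     repeat  =   []
--     tmp = seq[ -1]
--     for i in range( len(seq)-2, -1, -1):
--         if seq[ i] == tmp:
--             repeat.append( i)
--         else:
--             tmp = seq[ i]
--     return repeat
-- ===== SOURCE B (Python) =====
-- def get_repeat_idx(seq):
--     # pass 1: run-length encode seq into [value, length] runs, in order
--     runs = []
--     for x in seq:
--         if runs and runs[-1][0] == x:
--             runs[-1][1] += 1
--         else: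
--             runs.append([x, 1])
--     # pass 2: walk runs back-to-front; a run occupying [end-L, end) contributes
--     # the repeat indices end-2 down to end-L, so the output is descending
--     out = []
--     end = len(seq)
--     for _, L in reversed(runs):
--         out.extend(range(end - 2, end - L - 1, -1))
--         end -= L
--     return out
-- ===== Notes on version B (the rewrite author's own statement) =====
-- stated objective: alternative
-- what changed: B replaces A's single reverse scan with a tmp accumulator by two staged passes: first run-length encode the sequence into (value, length) runs, then walk the runs back-to-front, each run of length L occupying [end-L, end) contributing the index range end-2 down to end-L, so no element comparison happens during emission.
-- crash fix: On the empty list A raises IndexError (it reads seq[-1]); B returns []. — e.g. on get_repeat_idx([]): A raises IndexError, B returns []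
import Mathlib
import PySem

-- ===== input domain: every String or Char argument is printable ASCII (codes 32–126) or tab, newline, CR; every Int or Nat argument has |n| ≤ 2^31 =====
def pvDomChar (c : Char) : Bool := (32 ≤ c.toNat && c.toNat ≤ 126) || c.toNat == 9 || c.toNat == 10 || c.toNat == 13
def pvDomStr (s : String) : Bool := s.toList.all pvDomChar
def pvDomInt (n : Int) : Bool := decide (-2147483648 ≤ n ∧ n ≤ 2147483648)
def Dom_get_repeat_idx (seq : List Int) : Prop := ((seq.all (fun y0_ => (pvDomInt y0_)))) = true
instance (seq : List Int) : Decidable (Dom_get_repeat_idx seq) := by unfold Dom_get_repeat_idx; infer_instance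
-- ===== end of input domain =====

-- B re-implements A by a different algorithm: run-length encode the sequence, then walk
-- the runs back-to-front emitting each run's within-run indices; objective: alternative.


-- ===== PORT A =====
-- literal port of A: tmp := seq[-1]; loop i over range(len(seq)-2, -1, -1),
-- appending i when seq[i] == tmp, else tmp := seq[i]
def get_repeat_idx (seq : List Int) : List Int :=
  let tmp := PySem.List.pyGetD seq (-1) 0   -- seq[-1]; Pre_ excludes the empty list, where Python raises
  ((PySem.List.pyRange ((seq.length : Int) - 2) (-1) (-1)).foldl
    (fun st i =>
      if PySem.List.pyGetD seq i 0 = st.1 then (st.1, st.2 ++ [i])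
      else (PySem.List.pyGetD seq i 0, st.2))
    (tmp, ([] : List Int))).2

-- ===== PORT B =====
-- pass-1 step of B: `if runs and runs[-1][0] == x: runs[-1][1] += 1 else: runs.append([x, 1])`
def pvBumpLast (runs : List (Int × Int)) (x : Int) : List (Int × Int) :=
  match runs.getLast? with
  | some (v, L) => if v = x then runs.dropLast ++ [(v, L + 1)] else runs ++ [(x, 1)]
  | none => [(x, 1)]

-- port of B: run-length encode, then walk the runs back-to-front, each run [end-L, end)
-- contributing `range(end-2, end-L-1, -1)`
def get_repeat_idx_alt (seq : List Int) : List Int :=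
  let runs := seq.foldl pvBumpLast []
  (runs.reverse.foldl
    (fun st (r : Int × Int) =>
      (st.1 ++ PySem.List.pyRange (st.2 - 2) (st.2 - r.2 - 1) (-1), st.2 - r.2))
    (([] : List Int), (seq.length : Int))).1

-- ===== PRECONDITION & SPEC =====
-- Pre_ excludes exactly the empty list, on which Python A raises IndexError at `seq[-1]`.
def Pre_get_repeat_idx (seq : List Int) : Prop := seq ≠ []
instance (seq : List Int) : Decidable (Pre_get_repeat_idx seq) := by unfold Pre_get_repeat_idx; infer_instance
def pvWitness_get_repeat_idx : List Int := [1, 1, 2]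

-- On the empty list A raises IndexError (it reads seq[-1]); B returns [].
def Raises_get_repeat_idx (seq : List Int) : Prop := seq = []
instance (seq : List Int) : Decidable (Raises_get_repeat_idx seq) := by unfold Raises_get_repeat_idx; infer_instance
def pvRaiseWitness_get_repeat_idx : List Int := []
def pvRaiseWitnessOut_get_repeat_idx : List Int := []

def Spec_get_repeat_idx (seq : List Int) (out : List Int) : Prop := out = get_repeat_idx_alt seq
instance (seq : List Int) (out : List Int) : Decidable (Spec_get_repeat_idx seq out) := by unfold Spec_get_repeat_idx; infer_instance

-- ===== CLAIM (what is proved, stated in full; the proofs are below) =====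
def Claim_equal_get_repeat_idx : Prop := ∀ (seq : List Int), Dom_get_repeat_idx seq → Pre_get_repeat_idx seq → Spec_get_repeat_idx seq (get_repeat_idx seq)
def Claim_raises_get_repeat_idx : Prop := (∀ (seq : List Int), Dom_get_repeat_idx seq → Raises_get_repeat_idx seq → ¬ Pre_get_repeat_idx seq) ∧ (Dom_get_repeat_idx (pvRaiseWitness_get_repeat_idx) ∧ Raises_get_repeat_idx (pvRaiseWitness_get_repeat_idx) ∧ get_repeat_idx_alt (pvRaiseWitness_get_repeat_idx) = pvRaiseWitnessOut_get_repeat_idx)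

-- ===== LEMMAS AND PROOFS =====

-- Common characterization both ports are reduced to:
-- the descending list of indices i with seq[i] == seq[i+1].
def pvDfilter (seq : List Int) : List Int :=
  (PySem.List.pyRange ((seq.length : Int) - 2) (-1) (-1)).filter
    (fun i => decide (PySem.List.pyGetD seq i 0 = PySem.List.pyGetD seq (i + 1) 0))

-- ---------- A-side: A's fold equals pvDfilter ----------

-- Loop invariant: entering index a = k-1, A's tmp holds the value of seq[k];
-- the fold then appends exactly the indices i with seq[i] == seq[i+1], in range order.
lemma get_repeat_idx_loop (seq : List Int) : ∀ (k : Nat) (acc : List Int),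
    ((PySem.List.pyRange ((k : Int) - 1) (-1) (-1)).foldl
      (fun st i =>
        if PySem.List.pyGetD seq i 0 = st.1 then (st.1, st.2 ++ [i])
        else (PySem.List.pyGetD seq i 0, st.2))
      (PySem.List.pyGetD seq (k : Int) 0, acc)).2
    = acc ++ (PySem.List.pyRange ((k : Int) - 1) (-1) (-1)).filter
        (fun i => decide (PySem.List.pyGetD seq i 0 = PySem.List.pyGetD seq (i + 1) 0)) := by
  intro k
  induction k with
  | zero =>
    intro acc
    rw [PySem.List.pyRange_neg_one_eq_nil (by norm_num)]
    simp
  | succ m ih =>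
    intro acc
    have h3 : ((m + 1 : Nat) : Int) - 1 = (m : Nat) := by push_cast; ring
    have hcons : PySem.List.pyRange ((m : Nat) : Int) (-1) (-1)
        = ((m : Nat) : Int) :: PySem.List.pyRange (((m : Nat) : Int) - 1) (-1) (-1) :=
      PySem.List.pyRange_neg_one_cons (by omega)
    rw [h3, hcons]
    simp only [List.foldl_cons, List.filter_cons]
    by_cases h : PySem.List.pyGetD seq (m : Int) 0 = PySem.List.pyGetD seq ((m + 1 : Nat) : Int) 0
    · have hm1 : (m : Int) + 1 = ((m + 1 : Nat) : Int) := by push_cast; ring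
      rw [if_pos h, show (decide (PySem.List.pyGetD seq (m : Int) 0
            = PySem.List.pyGetD seq ((m : Int) + 1) 0)) = true by
          rw [hm1]; exact decide_eq_true h]
      rw [← h, ih (acc ++ [(m : Int)])]
      simp
    · have hm1 : (m : Int) + 1 = ((m + 1 : Nat) : Int) := by push_cast; ring
      rw [if_neg h, show (decide (PySem.List.pyGetD seq (m : Int) 0
            = PySem.List.pyGetD seq ((m : Int) + 1) 0)) = false by
          rw [hm1]; exact decide_eq_false h]
      exact ih acc

lemma get_repeat_idx_eq_dfilter (seq : List Int) (hpre : seq ≠ []) :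
    get_repeat_idx seq = pvDfilter seq := by
  unfold get_repeat_idx pvDfilter
  have hn : 1 ≤ seq.length := List.length_pos_iff.mpr hpre
  have hlen : (seq.length : Int) - 2 = ((seq.length - 1 : Nat) : Int) - 1 := by
    push_cast [hn]; ring
  have htmp : PySem.List.pyGetD seq (-1) 0
      = PySem.List.pyGetD seq ((seq.length - 1 : Nat) : Int) 0 := by
    rw [PySem.List.pyGetD_neg_ofNat seq 1 0 (by omega) (by omega),
        PySem.List.pyGetD_natCast]
    simp [List.getD, List.getElem?_eq_getElem (by omega : seq.length - 1 < seq.length)]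
  rw [hlen, htmp, get_repeat_idx_loop seq (seq.length - 1) []]
  simp

-- ---------- B-side: B's two passes equal pvDfilter ----------

-- recursive form of B's pass-2 fold
def pvEmit : List (Int × Int) → Int → List Int
  | [], _ => []
  | (_, L) :: rest, e => PySem.List.pyRange (e - 2) (e - L - 1) (-1) ++ pvEmit rest (e - L)

lemma pvEmit_foldl : ∀ (rs : List (Int × Int)) (out : List Int) (e : Int),
    (rs.foldl
      (fun st (r : Int × Int) =>
        (st.1 ++ PySem.List.pyRange (st.2 - 2) (st.2 - r.2 - 1) (-1), st.2 - r.2))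
      (out, e)).1 = out ++ pvEmit rs e := by
  intro rs
  induction rs with
  | nil => intro out e; simp [pvEmit]
  | cons r rest ih =>
    intro out e
    obtain ⟨v, L⟩ := r
    simp only [List.foldl_cons, pvEmit, ih]
    simp

-- `pvRLEOk s rs` : rs is the run-length encoding B's pass 1 builds for s
inductive pvRLEOk : List Int → List (Int × Int) → Prop
  | nil : pvRLEOk [] []
  | snoc_new (s : List Int) (rs : List (Int × Int)) (x : Int)
      (hne : ∀ p ∈ rs.getLast?, p.1 ≠ x) :
      pvRLEOk s rs → pvRLEOk (s ++ [x]) (rs ++ [(x, 1)])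
  | snoc_same (s : List Int) (rs : List (Int × Int)) (v : Int) (L : Int) :
      pvRLEOk s (rs ++ [(v, L)]) → pvRLEOk (s ++ [v]) (rs ++ [(v, L + 1)])

lemma pvRLE_step (s : List Int) (rs : List (Int × Int)) (x : Int)
    (h : pvRLEOk s rs) : pvRLEOk (s ++ [x]) (pvBumpLast rs x) := by
  cases hg : rs.getLast? with
  | none =>
    have hb : pvBumpLast rs x = [(x, 1)] := by unfold pvBumpLast; rw [hg]
    have hrs : rs = [] := List.getLast?_eq_none_iff.mp hg
    subst hrs
    rw [hb]
    exact pvRLEOk.snoc_new s [] x (by simp) h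
  | some p =>
    obtain ⟨v, L⟩ := p
    have hne : rs ≠ [] := by intro hnil; simp [hnil] at hg
    have hgl : rs.getLast hne = (v, L) := by
      have h2 := List.getLast?_eq_some_getLast hne
      rw [h2, Option.some.injEq] at hg
      exact hg
    have hsplit : rs.dropLast ++ [(v, L)] = rs := by
      have h2 := List.dropLast_append_getLast hne
      rwa [hgl] at h2
    by_cases hvx : v = x
    · have hb : pvBumpLast rs x = rs.dropLast ++ [(v, L + 1)] := by
        unfold pvBumpLast; rw [hg]; simp [hvx]
      rw [hb]
      subst hvx
      exact pvRLEOk.snoc_same s rs.dropLast v L (by rwa [hsplit])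
    · have hb : pvBumpLast rs x = rs ++ [(x, 1)] := by
        unfold pvBumpLast; rw [hg]; simp [hvx]
      rw [hb]
      exact pvRLEOk.snoc_new s rs x (by simp [hg, hvx]) h

lemma pvRLE_fold (s : List Int) : pvRLEOk s (s.foldl pvBumpLast []) := by
  induction s using List.reverseRecOn with
  | nil => exact pvRLEOk.nil
  | append_singleton s x ih =>
    rw [List.foldl_append]
    exact pvRLE_step s _ x ih

lemma pvRLE_len (s : List Int) (rs : List (Int × Int)) (h : pvRLEOk s rs) :
    ∀ r ∈ rs, 1 ≤ r.2 := by
  induction h with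
  | nil => simp
  | snoc_new s rs x hne _ ih =>
    intro r hr
    rcases List.mem_append.mp hr with h1 | h1
    · exact ih r h1
    · simp at h1; simp [h1]
  | snoc_same s rs v L _ ih =>
    intro r hr
    rcases List.mem_append.mp hr with h1 | h1
    · exact ih r (List.mem_append.mpr (Or.inl h1))
    · have := ih (v, L) (List.mem_append.mpr (Or.inr (by simp)))
      simp at h1 this; simp [h1]; omega

lemma pvRLE_lastVal (s : List Int) (rs : List (Int × Int)) (h : pvRLEOk s rs) :
    rs.getLast?.map Prod.fst = s.getLast? := by
  cases h with
  | nil => simp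
  | snoc_new s rs x hne h0 => simp
  | snoc_same s rs v L h0 => simp

-- lookups into s ++ [x] at the indices pvDfilter s inspects agree with s
lemma pvFilter_ext (s : List Int) (x : Int) :
    (PySem.List.pyRange ((s.length : Int) - 2) (-1) (-1)).filter
      (fun i => decide (PySem.List.pyGetD (s ++ [x]) i 0 = PySem.List.pyGetD (s ++ [x]) (i + 1) 0))
    = (PySem.List.pyRange ((s.length : Int) - 2) (-1) (-1)).filter
      (fun i => decide (PySem.List.pyGetD s i 0 = PySem.List.pyGetD s (i + 1) 0)) := by
  apply List.filter_congr
  intro i hi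
  have hmem := (PySem.List.mem_pyRange_neg_one).mp hi
  have hget : ∀ j : Int, 0 ≤ j → j < (s.length : Int) →
      PySem.List.pyGetD (s ++ [x]) j 0 = PySem.List.pyGetD s j 0 := by
    intro j h0 hj
    rw [PySem.List.pyGetD_eq_getElem (s ++ [x]) (i := j) 0 h0 (by simp; omega),
        PySem.List.pyGetD_eq_getElem s (i := j) 0 h0 hj]
    exact List.getElem_append_left (by omega)
  rw [hget i (by omega) (by omega), hget (i + 1) (by omega) (by omega)]

-- the last element of s ++ [x], as pyGetD at index len s
lemma pvGet_concat (s : List Int) (x : Int) :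
    PySem.List.pyGetD (s ++ [x]) (s.length : Int) 0 = x := by
  rw [PySem.List.pyGetD_eq_getElem (s ++ [x]) (i := (s.length : Int)) 0 (by omega) (by simp)]
  have ht : ((s.length : Int)).toNat = s.length := by omega
  simp only [ht]
  exact List.getElem_concat_length rfl (by simp)

-- the second-to-last element of s ++ [x] is the last of s
lemma pvGet_before_concat (s : List Int) (x : Int) (hs : s ≠ []) :
    PySem.List.pyGetD (s ++ [x]) ((s.length : Int) - 1) 0 = s.getLast hs := by
  have hn : 1 ≤ s.length := List.length_pos_iff.mpr hs
  rw [PySem.List.pyGetD_eq_getElem (s ++ [x]) (i := (s.length : Int) - 1) 0 (by omega) (by simp)]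
  have ht : ((s.length : Int) - 1).toNat = s.length - 1 := by omega
  simp only [ht]
  rw [List.getElem_append_left (by omega)]
  exact (List.getLast_eq_getElem hs).symm

-- appending a fresh value adds no repeat index
lemma pvDfilter_append_ne (s : List Int) (x : Int) (hs : s ≠ [])
    (hlast : s.getLast hs ≠ x) : pvDfilter (s ++ [x]) = pvDfilter s := by
  have hn : 1 ≤ s.length := List.length_pos_iff.mpr hs
  unfold pvDfilter
  rw [show (((s ++ [x]).length : Int) - 2) = (s.length : Int) - 1 by simp; ring,
      PySem.List.pyRange_neg_one_cons (by omega : (-1 : Int) < (s.length : Int) - 1),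
      List.filter_cons]
  have hA := pvGet_before_concat s x hs
  have hB : PySem.List.pyGetD (s ++ [x]) ((s.length : Int) - 1 + 1) 0 = x := by
    rw [show (s.length : Int) - 1 + 1 = (s.length : Int) by ring]; exact pvGet_concat s x
  rw [if_neg (by simp [hA]; exact hlast)]
  rw [show (s.length : Int) - 1 - 1 = (s.length : Int) - 2 by ring]
  exact pvFilter_ext s x

-- appending a repeated value adds exactly the repeat index len s - 1
lemma pvDfilter_append_eq (s : List Int) (v : Int) (hs : s ≠ [])
    (hlast : s.getLast hs = v) :
    pvDfilter (s ++ [v]) = ((s.length : Int) - 1) :: pvDfilter s := by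
  have hn : 1 ≤ s.length := List.length_pos_iff.mpr hs
  unfold pvDfilter
  rw [show (((s ++ [v]).length : Int) - 2) = (s.length : Int) - 1 by simp; ring,
      PySem.List.pyRange_neg_one_cons (by omega : (-1 : Int) < (s.length : Int) - 1),
      List.filter_cons]
  have hA : PySem.List.pyGetD (s ++ [v]) ((s.length : Int) - 1) 0 = v := by
    rw [pvGet_before_concat s v hs]; exact hlast
  have hB : PySem.List.pyGetD (s ++ [v]) ((s.length : Int) - 1 + 1) 0 = v := by
    rw [show (s.length : Int) - 1 + 1 = (s.length : Int) by ring]; exact pvGet_concat s v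
  rw [if_pos (by simp [hA])]
  rw [show (s.length : Int) - 1 - 1 = (s.length : Int) - 2 by ring]
  rw [pvFilter_ext s v]

lemma pvEmit_eq_dfilter (s : List Int) (rs : List (Int × Int)) (h : pvRLEOk s rs) :
    pvEmit rs.reverse (s.length : Int) = pvDfilter s := by
  induction h with
  | nil =>
    unfold pvDfilter
    rw [PySem.List.pyRange_neg_one_eq_nil (by norm_num)]
    simp [pvEmit]
  | snoc_new s rs x hne h0 ih =>
    rw [List.reverse_append]
    simp only [List.reverse_singleton, List.singleton_append, pvEmit]
    have hlen : ((s ++ [x]).length : Int) = (s.length : Int) + 1 := by simp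
    rw [hlen]
    rw [PySem.List.pyRange_neg_one_eq_nil (by omega :
          (s.length : Int) + 1 - 2 ≤ (s.length : Int) + 1 - 1 - 1), List.nil_append,
        show (s.length : Int) + 1 - 1 = (s.length : Int) by ring, ih]
    rcases eq_or_ne s [] with hsnil | hsnil
    · subst hsnil
      unfold pvDfilter
      rw [PySem.List.pyRange_neg_one_eq_nil (by norm_num : ((([] : List Int)).length : Int) - 2 ≤ -1),
          PySem.List.pyRange_neg_one_eq_nil (by simp : ((([] : List Int) ++ [x]).length : Int) - 2 ≤ -1)]
      simp
    · have hlast : s.getLast hsnil ≠ x := by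
        have hlv := pvRLE_lastVal s rs h0
        rw [List.getLast?_eq_some_getLast hsnil] at hlv
        cases hg : rs.getLast? with
        | none => rw [hg] at hlv; simp at hlv
        | some p =>
          rw [hg] at hlv
          simp at hlv
          have := hne p (by simp [hg])
          rwa [hlv] at this
      exact (pvDfilter_append_ne s x hsnil hlast).symm
  | snoc_same s rs v L h0 ih =>
    have hs : s ≠ [] := by
      have hlv := pvRLE_lastVal s (rs ++ [(v, L)]) h0
      intro hnil
      rw [hnil] at hlv; simp at hlv
    have hn : 1 ≤ s.length := List.length_pos_iff.mpr hs
    have hL : 1 ≤ L := pvRLE_len s (rs ++ [(v, L)]) h0 (v, L) (by simp)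
    have hlastv : s.getLast hs = v := by
      have hlv := pvRLE_lastVal s (rs ++ [(v, L)]) h0
      rw [List.getLast?_eq_some_getLast hs] at hlv
      simp at hlv
      exact hlv.symm
    rw [List.reverse_append] at ih ⊢
    simp only [List.reverse_singleton, List.singleton_append, pvEmit] at ih ⊢
    have hlen : ((s ++ [v]).length : Int) = (s.length : Int) + 1 := by simp
    rw [hlen,
        show (s.length : Int) + 1 - 2 = (s.length : Int) - 1 by ring,
        show (s.length : Int) + 1 - (L + 1) - 1 = (s.length : Int) - L - 1 by ring,
        show (s.length : Int) + 1 - (L + 1) = (s.length : Int) - L by ring,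
        PySem.List.pyRange_neg_one_cons (by omega : (s.length : Int) - L - 1 < (s.length : Int) - 1),
        show (s.length : Int) - 1 - 1 = (s.length : Int) - 2 by ring,
        List.cons_append, ih]
    exact (pvDfilter_append_eq s v hs hlastv).symm

lemma get_repeat_idx_alt_eq_dfilter (seq : List Int) :
    get_repeat_idx_alt seq = pvDfilter seq := by
  unfold get_repeat_idx_alt
  rw [pvEmit_foldl, List.nil_append]
  exact pvEmit_eq_dfilter seq (seq.foldl pvBumpLast []) (pvRLE_fold seq)

-- ===== VERDICT (by name: the statement is the Claim_ definition above) =====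
theorem get_repeat_idx_spec : Claim_equal_get_repeat_idx := by
  intro seq _ hpre
  unfold Spec_get_repeat_idx
  rw [get_repeat_idx_eq_dfilter seq hpre, get_repeat_idx_alt_eq_dfilter seq]

@[simp] theorem get_repeat_idx_raises : Claim_raises_get_repeat_idx := by
  unfold Claim_raises_get_repeat_idx
  refine ⟨fun seq _ h => ?_, by decide⟩
  unfold Raises_get_repeat_idx at h
  simp [Pre_get_repeat_idx, h]
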